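-- pv_equiv track=rewrite | github.com/walidozich/advent-of-code | challenge2.py | sum_repeated_double_in_range
-- ===== SOURCE A (Python) =====
-- def sum_repeated_double_in_range(a: int, b: int) -> int:
-- 	"""Return sum of numbers n in [a,b] where n = t repeated twice (no leading zeros).
--
-- 	For a given split length k (t has k digits), numbers are n = t * (10^k + 1).
-- 	We compute bounds on t and use arithmetic series sum.
-- 	"""
-- 	total = 0
-- 	s_b = len(str(b))
-- 	# k is the length of the half (t). n has length 2*k, so k up to s_b//2
-- 	for k in range(1, (s_b // 2) + 1):
-- 		mult = 10**k + 1
-- 		t_min = 10 ** (k - 1)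
-- 		t_max = 10**k - 1
--
-- 		# t must satisfy: a <= t*mult <= b
-- 		lo = (a + mult - 1) // mult
-- 		hi = b // mult
--
-- 		lo = max(lo, t_min)
-- 		hi = min(hi, t_max)
-- 		if lo <= hi:
-- 			count = hi - lo + 1
-- 			# sum of t from lo..hi = (lo+hi)*count//2
-- 			tsum = (lo + hi) * count // 2
-- 			total += mult * tsum
-- 	return total
-- ===== SOURCE B (Python) =====
-- def sum_repeated_double_in_range(a: int, b: int) -> int:
-- 	"""Return sum of numbers n in [a,b] where n = t repeated twice (no leading zeros).
--
-- 	Direct enumeration: for each half-length k, construct every doubled number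
-- 	t*(10**k + 1) with t of k digits and add it if it falls inside [a, b].
-- 	"""
-- 	total = 0
-- 	for k in range(1, len(str(b)) // 2 + 1):
-- 		mult = 10**k + 1
-- 		for t in range(10 ** (k - 1), 10**k):
-- 			n = t * mult
-- 			if a <= n <= b:
-- 				total += n
-- 	return total
-- ===== Notes on version B (the rewrite author's own statement) =====
-- stated objective: simpler
-- what changed: Replaces the closed-form bound derivation (ceiling/floor division plus arithmetic-series sum per half-length) with direct enumeration: every doubled number t*(10^k+1) is constructed explicitly and added if it lies in [a,b].
import Mathlib
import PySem

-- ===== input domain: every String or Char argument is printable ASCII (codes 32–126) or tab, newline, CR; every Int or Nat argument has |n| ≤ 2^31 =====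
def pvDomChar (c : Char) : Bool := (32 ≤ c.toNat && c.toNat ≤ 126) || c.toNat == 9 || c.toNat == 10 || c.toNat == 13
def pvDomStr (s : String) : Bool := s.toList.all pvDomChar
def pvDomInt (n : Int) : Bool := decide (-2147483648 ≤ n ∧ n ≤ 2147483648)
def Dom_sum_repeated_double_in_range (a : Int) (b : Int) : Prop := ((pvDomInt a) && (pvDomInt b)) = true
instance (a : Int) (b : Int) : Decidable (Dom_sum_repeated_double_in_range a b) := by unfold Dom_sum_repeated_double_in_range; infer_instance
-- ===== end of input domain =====

-- B replaces A's per-half-length closed-form arithmetic-series sum by direct enumeration of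
-- every doubled number t*(10^k+1) with a range check (simpler to read; not faster).

-- ===== PORT A =====
def sum_repeated_double_in_range (a : Int) (b : Int) : Int :=
  let s_b : Int := PySem.Str.len (PySem.Int.toStr b)
  (PySem.List.pyRange 1 (PySem.Int.floordiv s_b 2 + 1) 1).foldl (fun total k =>
    let mult : Int := 10 ^ k.toNat + 1
    let t_min : Int := 10 ^ (k - 1).toNat
    let t_max : Int := 10 ^ k.toNat - 1
    let lo : Int := PySem.Int.floordiv (a + mult - 1) mult
    let hi : Int := PySem.Int.floordiv b mult
    let lo : Int := max lo t_min
    let hi : Int := min hi t_max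
    if lo ≤ hi then
      let count : Int := hi - lo + 1
      let tsum : Int := PySem.Int.floordiv ((lo + hi) * count) 2
      total + mult * tsum
    else total) 0

-- ===== PORT B =====
def sum_repeated_double_in_range_alt (a : Int) (b : Int) : Int :=
  (PySem.List.pyRange 1 (PySem.Int.floordiv (PySem.Str.len (PySem.Int.toStr b)) 2 + 1) 1).foldl
    (fun total k =>
      let mult : Int := 10 ^ k.toNat + 1
      (PySem.List.pyRange (10 ^ (k - 1).toNat) (10 ^ k.toNat) 1).foldl (fun total t =>
        let n : Int := t * mult
        if a ≤ n ∧ n ≤ b then total + n else total) total) 0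

-- ===== PRECONDITION & SPEC =====
def Spec_sum_repeated_double_in_range (a : Int) (b : Int) (out : Int) : Prop := out = sum_repeated_double_in_range_alt a b
instance (a : Int) (b : Int) (out : Int) : Decidable (Spec_sum_repeated_double_in_range a b out) := by unfold Spec_sum_repeated_double_in_range; infer_instance

-- ===== CLAIM (what is proved, stated in full; the proofs are below) =====
def Claim_equal_sum_repeated_double_in_range : Prop := ∀ (a : Int) (b : Int), Dom_sum_repeated_double_in_range a b → Spec_sum_repeated_double_in_range a b (sum_repeated_double_in_range a b)

-- ===== LEMMAS AND PROOFS =====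

-- Sum of the integers l, l+1, …, h (0 if h < l); proof-side characterisation of both programs' per-k term.
def iccSum (l h : Int) : Int :=
  if l ≤ h then l + iccSum (l + 1) h else 0
termination_by (h + 1 - l).toNat
decreasing_by omega

theorem iccSum_of_gt (l h : Int) (hlt : h < l) : iccSum l h = 0 := by
  rw [iccSum]; simp [not_le.mpr hlt]

theorem iccSum_of_le (l h : Int) (hle : l ≤ h) : iccSum l h = l + iccSum (l + 1) h := by
  rw [iccSum]; simp [hle]

-- Gauss: 2 · (l + … + h) = (l + h)(h − l + 1).
theorem iccSum_gauss (l h : Int) (hle : l ≤ h) : 2 * iccSum l h = (l + h) * (h - l + 1) := by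
  have hn : ∃ n : Nat, (h - l).toNat = n := ⟨_, rfl⟩
  obtain ⟨n, hn⟩ := hn
  induction n generalizing l with
  | zero =>
    have : l = h := by omega
    subst this
    rw [iccSum_of_le l l le_rfl, iccSum_of_gt (l + 1) l (by omega)]
    ring
  | succ n ih =>
    have hlh : l < h := by omega
    rw [iccSum_of_le l h hle]
    have := ih (l + 1) (by omega) (by omega)
    linear_combination this

-- The per-t condition a ≤ t·m ∧ t·m ≤ b is the interval L ≤ t ≤ H with
-- L = ⌈a/m⌉ = (a+m-1)//m and H = b//m, for m > 0.
theorem cond_iff (a b m t : Int) (hm : 0 < m) :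
    (a ≤ t * m ∧ t * m ≤ b) ↔
      (PySem.Int.floordiv (a + m - 1) m ≤ t ∧ t ≤ PySem.Int.floordiv b m) := by
  have h1 : PySem.Int.floordiv (a + m - 1) m < t + 1 ↔ a + m - 1 < (t + 1) * m :=
    PySem.Int.floordiv_lt_iff_lt_mul hm
  have h2 : t ≤ PySem.Int.floordiv b m ↔ t * m ≤ b := PySem.Int.le_floordiv_iff_mul_le hm
  have e : (t + 1) * m = t * m + m := by ring
  rw [e] at h1
  omega

-- Enumerated sum over a range with an interval test = m · iccSum over the clipped interval.
theorem sum_clip (m L H : Int) (lo hi : Int) :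
    ((PySem.List.pyRange lo hi 1).map (fun t => if L ≤ t ∧ t ≤ H then t * m else 0)).sum
      = m * iccSum (max L lo) (min H (hi - 1)) := by
  have hn : ∃ n : Nat, (hi - lo).toNat = n := ⟨_, rfl⟩
  obtain ⟨n, hn⟩ := hn
  induction n generalizing lo with
  | zero =>
    rw [PySem.List.pyRange_one_eq_nil (by omega)]
    rw [iccSum_of_gt _ _ (by omega)]
    simp
  | succ n ih =>
    have hlo : lo < hi := by omega
    rw [PySem.List.pyRange_one_cons hlo]
    simp only [List.map_cons, List.sum_cons]
    rw [ih (lo + 1) (by omega)]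
    by_cases h1 : L ≤ lo ∧ lo ≤ H
    · have hmaxl : max L lo = lo := by omega
      have hmaxl1 : max L (lo + 1) = lo + 1 := by omega
      have hlom : lo ≤ min H (hi - 1) := by omega
      rw [hmaxl, hmaxl1, if_pos h1, iccSum_of_le _ _ hlom]
      ring
    · rw [if_neg h1]
      push_neg at h1
      by_cases h2 : lo < L
      · have : max L lo = max L (lo + 1) := by omega
        rw [this]; ring
      · have hH : H < lo := by omega
        rw [iccSum_of_gt _ _ (by omega), iccSum_of_gt _ _ (by omega)]
        ring

-- Per-k: B's inner enumeration loop equals A's closed-form term, for every k.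
theorem per_k (a b : Int) (k : Int) (total : Int) :
    (PySem.List.pyRange (10 ^ (k - 1).toNat) (10 ^ k.toNat) 1).foldl (fun total t =>
        if a ≤ t * (10 ^ k.toNat + 1) ∧ t * (10 ^ k.toNat + 1) ≤ b
        then total + t * (10 ^ k.toNat + 1) else total) total
      =
    (if max (PySem.Int.floordiv (a + (10 ^ k.toNat + 1) - 1) (10 ^ k.toNat + 1)) (10 ^ (k - 1).toNat)
        ≤ min (PySem.Int.floordiv b (10 ^ k.toNat + 1)) ((10 ^ k.toNat : Int) - 1) then
       total + (10 ^ k.toNat + 1) *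
         PySem.Int.floordiv
           ((max (PySem.Int.floordiv (a + (10 ^ k.toNat + 1) - 1) (10 ^ k.toNat + 1)) (10 ^ (k - 1).toNat)
             + min (PySem.Int.floordiv b (10 ^ k.toNat + 1)) ((10 ^ k.toNat : Int) - 1)) *
            (min (PySem.Int.floordiv b (10 ^ k.toNat + 1)) ((10 ^ k.toNat : Int) - 1)
             - max (PySem.Int.floordiv (a + (10 ^ k.toNat + 1) - 1) (10 ^ k.toNat + 1)) (10 ^ (k - 1).toNat) + 1)) 2
     else total) := by
  have hm : (0 : Int) < 10 ^ k.toNat + 1 := by positivity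
  have hcond : ∀ (tot t : Int),
      (if a ≤ t * (10 ^ k.toNat + 1) ∧ t * (10 ^ k.toNat + 1) ≤ b
       then tot + t * (10 ^ k.toNat + 1) else tot)
        = tot + (if PySem.Int.floordiv (a + (10 ^ k.toNat + 1) - 1) (10 ^ k.toNat + 1) ≤ t ∧
                    t ≤ PySem.Int.floordiv b (10 ^ k.toNat + 1)
                 then t * (10 ^ k.toNat + 1) else 0) := by
    intro tot t
    by_cases hc : a ≤ t * (10 ^ k.toNat + 1) ∧ t * (10 ^ k.toNat + 1) ≤ b
    · rw [if_pos hc, if_pos ((cond_iff a b _ t hm).mp hc)]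
    · rw [if_neg hc, if_neg (fun h => hc ((cond_iff a b _ t hm).mpr h)), add_zero]
  rw [PySem.List.foldl_congr_mem _ _
        (fun tot t => tot +
          (if PySem.Int.floordiv (a + (10 ^ k.toNat + 1) - 1) (10 ^ k.toNat + 1) ≤ t ∧
              t ≤ PySem.Int.floordiv b (10 ^ k.toNat + 1)
           then t * (10 ^ k.toNat + 1) else 0)) total
        (fun acc x _ => hcond acc x),
    PySem.List.foldl_add, sum_clip]
  set lo' : Int := max (PySem.Int.floordiv (a + (10 ^ k.toNat + 1) - 1) (10 ^ k.toNat + 1)) (10 ^ (k - 1).toNat)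
  set hi' : Int := min (PySem.Int.floordiv b (10 ^ k.toNat + 1)) ((10 ^ k.toNat : Int) - 1)
  by_cases hle : lo' ≤ hi'
  · rw [if_pos hle]
    have hg := iccSum_gauss lo' hi' hle
    have heq : PySem.Int.floordiv ((lo' + hi') * (hi' - lo' + 1)) 2 = iccSum lo' hi' := by
      rw [← hg, PySem.Int.floordiv_eq_ediv_of_pos (by omega)]
      exact Int.mul_ediv_cancel_left _ (by omega)
    rw [heq]
  · rw [if_neg hle, iccSum_of_gt _ _ (by omega)]
    ring

-- ===== VERDICT (by name: the statement is the Claim_ definition above) =====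
theorem sum_repeated_double_in_range_spec : Claim_equal_sum_repeated_double_in_range := by
  intro a b _
  unfold Spec_sum_repeated_double_in_range
  unfold sum_repeated_double_in_range sum_repeated_double_in_range_alt
  exact PySem.List.foldl_congr_mem _ _ _ _ (fun acc k _ => (per_k a b k acc).symm)
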